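-- pv_equiv track=rewrite | github.com/malabz/Jtmsa | BufferCenterAlign.py | getMarks
-- ===== SOURCE A (Python) =====
-- def getMarks(strsed: list, marks: list):
--     for string in strsed:
--         i = 0
--         counter = 0
--         for c in string:
--             if c == '-':
--                 counter += 1
--             else:
--                 marks[i] = max(marks[i], counter)
--                 counter = 0
--                 i += 1
--         marks[i] = max(marks[i], counter)
--     return marks
-- ===== SOURCE B (Python) =====
-- def getMarks(strsed: list, marks: list):
--     # Materialise each string's maximal gap-runs as segments, then fold them into marks.
--     for string in strsed:
--         segs = ''.join('-' if c == '-' else ',' for c in string).split(',')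
--         for i, seg in enumerate(segs):
--             if len(seg) > marks[i]:
--                 marks[i] = len(seg)
--     return marks
-- ===== Notes on version B (the rewrite author's own statement) =====
-- stated objective: idiomatic
-- what changed: Replaces the manual counter/position state machine with materialising each string's gap-run segments (map non-gap chars to a delimiter, split on it) and folding segment lengths into marks with enumerate.
import Mathlib
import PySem

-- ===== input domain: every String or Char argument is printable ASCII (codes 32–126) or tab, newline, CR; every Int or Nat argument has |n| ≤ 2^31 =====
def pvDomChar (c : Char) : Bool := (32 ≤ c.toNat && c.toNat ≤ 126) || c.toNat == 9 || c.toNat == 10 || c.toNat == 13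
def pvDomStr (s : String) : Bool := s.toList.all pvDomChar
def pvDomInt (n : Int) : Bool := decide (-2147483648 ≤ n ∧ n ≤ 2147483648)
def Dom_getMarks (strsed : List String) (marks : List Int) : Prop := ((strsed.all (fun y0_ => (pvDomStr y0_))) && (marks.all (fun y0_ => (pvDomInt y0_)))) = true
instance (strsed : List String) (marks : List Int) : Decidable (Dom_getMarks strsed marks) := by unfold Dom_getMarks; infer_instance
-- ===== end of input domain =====

-- B replaces A's per-character counter/position state machine by materialising each string's
-- gap-run segments (split on a delimiter substituted for every non-gap char) and folding the
-- segment lengths into marks. Both versions mutate `marks` in place in Python (B performs the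
-- same mutation); the equivalence proved here is about the returned value.

-- ===== PORT A =====
-- inner per-character step of A's loop: state (i, counter, marks)
def pvStepA (st : Nat × Nat × List Int) (c : Char) : Nat × Nat × List Int :=
  let (i, counter, m) := st
  if c = '-' then (i, counter + 1, m)
  else (i + 1, 0, PySem.List.pySetD m (i : Int) (max (PySem.List.pyGetD m (i : Int) 0) (counter : Int)))

-- the trailing `marks[i] = max(marks[i], counter)` after the inner loop
def pvFinA (st : Nat × Nat × List Int) : List Int :=
  let (i, counter, m) := st
  PySem.List.pySetD m (i : Int) (max (PySem.List.pyGetD m (i : Int) 0) (counter : Int))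

def getMarks (strsed : List String) (marks : List Int) : List Int :=
  strsed.foldl (fun m s => pvFinA (s.toList.foldl pvStepA (0, 0, m))) marks

-- ===== PORT B =====
-- ''.join('-' if c == '-' else ',' for c in string)
def pvJoinMap (cs : List Char) : List Char :=
  cs.map (fun c => if c = '-' then '-' else ',')

-- str.split(',') on the mapped characters (single-char separator, keeps empty pieces)
def pvSplitComma : List Char → List (List Char)
  | [] => [[]]
  | c :: rest =>
    match pvSplitComma rest with
    | [] => []
    | seg :: segs => if c = ',' then [] :: seg :: segs else (c :: seg) :: segs

def getMarks_alt (strsed : List String) (marks : List Int) : List Int :=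
  strsed.foldl (fun m s =>
    let segs := pvSplitComma (pvJoinMap s.toList)
    (PySem.List.enumerate segs 0).foldl
      (fun m p =>
        if ((p.2.length : Int) > PySem.List.pyGetD m p.1 0) then
          PySem.List.pySetD m p.1 ((p.2.length : Int))
        else m) m) marks

-- ===== PRECONDITION & SPEC =====
-- Pre_ excludes exactly the inputs on which Python A raises IndexError:
-- some string has at least `len(marks)` non-'-' characters, so `marks[i]` goes out of range.
def Pre_getMarks (strsed : List String) (marks : List Int) : Prop :=
  ∀ s ∈ strsed, (s.toList.countP (fun c => ¬ (c = '-'))).succ ≤ marks.length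
instance (strsed : List String) (marks : List Int) : Decidable (Pre_getMarks strsed marks) := by
  unfold Pre_getMarks; infer_instance

def pvWitness_getMarks : List String × List Int := (["a-b", "--", ""], [0, -2, 5])

def Spec_getMarks (strsed : List String) (marks : List Int) (out : List Int) : Prop := out = getMarks_alt strsed marks
instance (strsed : List String) (marks : List Int) (out : List Int) : Decidable (Spec_getMarks strsed marks out) := by unfold Spec_getMarks; infer_instance

-- ===== CLAIM (what is proved, stated in full; the proofs are below) =====
def Claim_equal_getMarks : Prop := ∀ (strsed : List String) (marks : List Int), Dom_getMarks strsed marks → Pre_getMarks strsed marks → Spec_getMarks strsed marks (getMarks strsed marks)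

-- ===== LEMMAS AND PROOFS =====

-- proof-side helpers
-- update marks at index i with candidate run length n (B's conditional update, Nat index)
def pvUpd (m : List Int) (i : Nat) (n : Nat) : List Int :=
  if (n : Int) > m.getD i 0 then m.set i (n : Int) else m

def pvFoldIdx (m : List Int) (i : Nat) : List Nat → List Int
  | [] => m
  | n :: ns => pvFoldIdx (pvUpd m i n) (i + 1) ns

-- lengths of the gap-run segments of cs (including empty runs), head-first
def pvLens : List Char → List Nat
  | [] => [0]
  | c :: cs =>
    if c = '-' then
      match pvLens cs with
      | [] => []
      | n :: ns => (n + 1) :: ns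
    else 0 :: pvLens cs

theorem pvSplitComma_ne_nil (cs : List Char) : pvSplitComma cs ≠ [] := by
  induction cs with
  | nil => simp [pvSplitComma]
  | cons c rest ih =>
    obtain ⟨seg, segs, h⟩ := List.exists_cons_of_ne_nil ih
    simp only [pvSplitComma, h]
    split <;> simp

theorem pvLens_ne_nil (cs : List Char) : pvLens cs ≠ [] := by
  induction cs with
  | nil => simp [pvLens]
  | cons c rest ih =>
    simp only [pvLens]
    split
    · cases h : pvLens rest with
      | nil => exact absurd h ih
      | cons n ns => simp
    · simp

theorem pvSplitComma_map_length (cs : List Char) :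
    (pvSplitComma (pvJoinMap cs)).map List.length = pvLens cs := by
  induction cs with
  | nil => simp [pvJoinMap, pvSplitComma, pvLens]
  | cons c rest ih =>
    simp only [pvJoinMap, List.map_cons] at *
    by_cases hc : c = '-'
    · simp only [hc, pvSplitComma, pvLens]
      cases hs : pvSplitComma (rest.map (fun c => if c = '-' then '-' else ',')) with
      | nil => exact absurd hs (pvSplitComma_ne_nil _)
      | cons seg segs =>
        rw [hs] at ih
        cases hl : pvLens rest with
        | nil => exact absurd hl (pvLens_ne_nil _)
        | cons n ns =>
          rw [hl] at ih
          simp only [List.map_cons] at ih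
          injection ih with ih1 ih2
          simp [ih1, ih2]
    · simp only [pvSplitComma, pvLens, if_neg hc]
      cases hs : pvSplitComma (rest.map (fun c => if c = '-' then '-' else ',')) with
      | nil => exact absurd hs (pvSplitComma_ne_nil _)
      | cons seg segs =>
        rw [hs] at ih
        simp [ih]

theorem pv_set_getD_self (m : List Int) (i : Nat) : m.set i (m.getD i 0) = m := by
  induction m generalizing i with
  | nil => rfl
  | cons x xs ih =>
    cases i with
    | zero => simp [List.set, List.getD]
    | succ j => simp only [List.set, List.getD_cons_succ]; rw [ih]

-- A's unconditional max-write equals B's conditional write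
theorem pv_set_max_eq_upd (m : List Int) (i : Nat) (n : Nat) :
    m.set i (max (m.getD i 0) (n : Int)) = pvUpd m i n := by
  unfold pvUpd
  split
  · next h => rw [max_eq_right (le_of_lt h)]
  · next h => rw [max_eq_left (by omega)]; exact pv_set_getD_self m i

-- the head of the segment-length list absorbs the pending counter
def pvAddHead (k : Nat) : List Nat → List Nat
  | [] => []
  | n :: ns => (k + n) :: ns

-- main per-string invariant: A's state machine from (i, counter, m) computes B's fold
-- over the segment lengths of cs, the first segment extended by the pending counter
theorem pv_main (cs : List Char) :
    ∀ (i counter : Nat) (m : List Int),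
      pvFinA (cs.foldl pvStepA (i, counter, m)) = pvFoldIdx m i (pvAddHead counter (pvLens cs)) := by
  induction cs with
  | nil =>
    intro i counter m
    simp only [List.foldl_nil, pvFinA, pvLens, pvAddHead, pvFoldIdx,
      PySem.List.pySetD_natCast, PySem.List.pyGetD_natCast]
    rw [pv_set_max_eq_upd]
    simp
  | cons c rest ih =>
    intro i counter m
    by_cases hc : c = '-'
    · have hstep : pvStepA (i, counter, m) c = (i, counter + 1, m) := by
        simp [pvStepA, hc]
      rw [List.foldl_cons, hstep, ih]
      simp only [pvLens, if_pos hc]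
      cases hl : pvLens rest with
      | nil => exact absurd hl (pvLens_ne_nil _)
      | cons n ns =>
        simp only [pvAddHead]
        have : counter + 1 + n = counter + (n + 1) := by omega
        rw [this]
    · have hstep : pvStepA (i, counter, m) c
        = (i + 1, 0, m.set i (max (m.getD i 0) (counter : Int))) := by
        simp [pvStepA, hc, PySem.List.pySetD_natCast, PySem.List.pyGetD_natCast]
      rw [List.foldl_cons, hstep, ih]
      simp only [pvLens, if_neg hc, pvAddHead]
      simp only [pvFoldIdx, Nat.add_zero]
      rw [pv_set_max_eq_upd]
      cases hl : pvLens rest with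
      | nil => exact absurd hl (pvLens_ne_nil _)
      | cons n ns => simp

-- B's enumerate-fold is pvFoldIdx over the segment lengths
theorem pv_enum_fold (segs : List (List Char)) :
    ∀ (i : Nat) (m : List Int),
      (PySem.List.enumerate segs (i : Int)).foldl
        (fun m p =>
          if ((p.2.length : Int) > PySem.List.pyGetD m p.1 0) then
            PySem.List.pySetD m p.1 ((p.2.length : Int))
          else m) m
      = pvFoldIdx m i (segs.map List.length) := by
  induction segs with
  | nil => intro i m; simp [PySem.List.enumerate_nil, pvFoldIdx]
  | cons seg rest ih =>
    intro i m
    rw [PySem.List.enumerate_cons, List.foldl_cons]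
    have hcast : (i : Int) + 1 = ((i + 1 : Nat) : Int) := by push_cast; ring
    rw [hcast, ih]
    simp only [List.map_cons, pvFoldIdx, pvUpd, PySem.List.pySetD_natCast,
      PySem.List.pyGetD_natCast]

-- per-string agreement of the two fold bodies
theorem pv_string_eq (s : String) (m : List Int) :
    pvFinA (s.toList.foldl pvStepA (0, 0, m))
      = (PySem.List.enumerate (pvSplitComma (pvJoinMap s.toList)) 0).foldl
          (fun m p =>
            if ((p.2.length : Int) > PySem.List.pyGetD m p.1 0) then
              PySem.List.pySetD m p.1 ((p.2.length : Int))
            else m) m := by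
  have h := pv_enum_fold (pvSplitComma (pvJoinMap s.toList)) 0 m
  simp only [Nat.cast_zero] at h
  rw [h, pvSplitComma_map_length, pv_main]
  cases hl : pvLens s.toList with
  | nil => exact absurd hl (pvLens_ne_nil _)
  | cons n ns => simp [pvAddHead]

theorem pv_all (strsed : List String) (marks : List Int) :
    getMarks strsed marks = getMarks_alt strsed marks := by
  unfold getMarks getMarks_alt
  induction strsed generalizing marks with
  | nil => rfl
  | cons s rest ih =>
    simp only [List.foldl_cons]
    rw [pv_string_eq, ih]

-- ===== VERDICT (by name: the statement is the Claim_ definition above) =====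
theorem getMarks_spec : Claim_equal_getMarks := by
  intro strsed marks _ _
  exact pv_all strsed marks
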